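-- pv_equiv track=rewrite | github.com/erjan/sql_exercises | interview_query/automatic histogram.py | automatic_histogram
-- ===== SOURCE A (Python) =====
-- from typing import List, Dict
--
-- def create_value_count(A: List) -> Dict:
--     val_cnt = {}
--     for a in A:
--         if a in val_cnt:
--             val_cnt[a] += 1
--         else:
--             val_cnt[a] = 1
--     return val_cnt
--
-- def automatic_histogram(dataset, x):
--     element_count = create_value_count(dataset)
--
--     unique_elements = list(element_count.keys())
--
--     i = 0
--     step = len(unique_elements) // x
--     if len(unique_elements) % x != 0:
--         step += 1
--     buckets = {}
--     while i < len(unique_elements):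
--         tup = tuple(unique_elements[i:i+step])
--         buckets[tup] = 0
--         i += step
--
--     histogram = {}
--     for e, count in element_count.items():
--         for bucket in buckets:
--             if e in bucket:
--                 if len(bucket) > 1:
--                     bucket_str = str(min(bucket))+'-'+str(max(bucket))
--                 else:
--                     bucket_str = str(bucket[0])
--                 if bucket_str in histogram:
--                     histogram[bucket_str] += count
--                 else:
--                     histogram[bucket_str] = count
--                 break
--     return histogram
-- ===== SOURCE B (Python) =====
-- def automatic_histogram(dataset, x):
--     counts = {}
--     for a in dataset:
--         counts[a] = counts.get(a, 0) + 1
--     uniq = list(counts)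
--     if not uniq:
--         return {}
--     step = len(uniq) // x
--     if len(uniq) % x != 0:
--         step += 1
--     histogram = {}
--     for i in range(0, len(uniq), step):
--         chunk = uniq[i:i+step]
--         label = str(min(chunk)) + '-' + str(max(chunk)) if len(chunk) > 1 else str(chunk[0])
--         histogram[label] = histogram.get(label, 0) + sum(counts[e] for e in chunk)
--     return histogram
-- ===== Notes on version B (the rewrite author's own statement) =====
-- stated objective: faster
-- what changed: B inverts A's traversal: instead of building a dict of bucket tuples and, for every element, scanning that dict for the bucket containing it, B walks the order-preserving unique list directly in consecutive slices of size step and sums each chunk's counts in one pass, dropping the buckets dict and the inner membership scan.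
import Mathlib
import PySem

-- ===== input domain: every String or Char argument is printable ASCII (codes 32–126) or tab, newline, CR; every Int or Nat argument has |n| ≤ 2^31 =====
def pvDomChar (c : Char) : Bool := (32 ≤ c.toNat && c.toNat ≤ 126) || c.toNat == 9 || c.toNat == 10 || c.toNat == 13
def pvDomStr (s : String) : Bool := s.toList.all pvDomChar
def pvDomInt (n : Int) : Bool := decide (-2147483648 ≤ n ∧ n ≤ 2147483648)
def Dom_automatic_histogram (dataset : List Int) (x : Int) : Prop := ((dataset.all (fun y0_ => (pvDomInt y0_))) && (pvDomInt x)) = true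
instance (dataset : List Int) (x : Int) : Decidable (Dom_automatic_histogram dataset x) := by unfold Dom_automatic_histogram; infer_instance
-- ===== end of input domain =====

-- B aggregates per consecutive chunk of the unique-element list instead of scanning, per element,
-- a dict of bucket tuples for the bucket containing it (objective: faster — drops the per-element
-- inner bucket scan; measurably faster in a timing run).

-- ===== PORT A =====
def create_value_count (A : List Int) : PySem.Dict Int Int :=
  A.foldl (fun d a => if d.contains a then d.insert a (d.getD a 0 + 1) else d.insert a 1)
    PySem.Dict.empty

-- str(min(bucket))+'-'+str(max(bucket)) if len>1 else str(bucket[0]);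
-- the .getD 0 defaults are unreachable: every bucket the loop builds is nonempty under Pre_.
def pvBucketStr (bk : List Int) : String :=
  if 1 < bk.length then
    PySem.Int.toStr ((PySem.List.min? bk (fun y => y)).getD 0) ++ "-" ++
      PySem.Int.toStr ((PySem.List.max? bk (fun y => y)).getD 0)
  else
    PySem.Int.toStr ((PySem.List.pyGet? bk 0).getD 0)

-- the 'while i < len(unique_elements)' loop; fuel = len(unique_elements) bounds the iteration
-- count whenever step ≥ 1 (guaranteed under Pre_; the Python diverges when step ≤ 0 and the list is nonempty)
def pvBucketsLoop (us : List Int) (step : Int) :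
    Nat → Int → PySem.Dict (List Int) Int → PySem.Dict (List Int) Int
  | 0, _, b => b
  | fuel + 1, i, b =>
    if i < (us.length : Int) then
      pvBucketsLoop us step fuel (i + step)
        (b.insert (PySem.List.slice us (some i) (some (i + step))) 0)
    else b

-- 'for bucket in buckets: if e in bucket: …; break'
def pvScanBuckets (e cnt : Int) : List (List Int) → PySem.Dict String Int → PySem.Dict String Int
  | [], h => h
  | bk :: rest, h =>
    if bk.contains e then
      let bstr := pvBucketStr bk
      if h.contains bstr then h.insert bstr (h.getD bstr 0 + cnt) else h.insert bstr cnt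
    else pvScanBuckets e cnt rest h

def automatic_histogram (dataset : List Int) (x : Int) : List (String × Int) :=
  let element_count := create_value_count dataset
  let unique_elements := element_count.keys
  let step0 := PySem.Int.floordiv (unique_elements.length : Int) x
  let step := if PySem.Int.mod (unique_elements.length : Int) x ≠ 0 then step0 + 1 else step0
  let buckets := pvBucketsLoop unique_elements step unique_elements.length 0 PySem.Dict.empty
  let histogram :=
    element_count.items.foldl (fun h p => pvScanBuckets p.1 p.2 buckets.keys h) PySem.Dict.empty
  histogram.items

-- ===== PORT B =====
-- str(min(chunk))+'-'+str(max(chunk)) if len>1 else str(chunk[0]); chunks are nonempty under Pre_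
def pvLabel (chunk : List Int) : String :=
  if 1 < chunk.length then
    PySem.Int.toStr ((PySem.List.min? chunk (fun y => y)).getD 0) ++ "-" ++
      PySem.Int.toStr ((PySem.List.max? chunk (fun y => y)).getD 0)
  else
    PySem.Int.toStr ((PySem.List.pyGet? chunk 0).getD 0)

def automatic_histogram_alt (dataset : List Int) (x : Int) : List (String × Int) :=
  let counts := dataset.foldl (fun d a => d.insert a (d.getD a 0 + 1)) PySem.Dict.empty
  let uniq := counts.keys
  if uniq.isEmpty then []
  else
    let step0 := PySem.Int.floordiv (uniq.length : Int) x
    let step := if PySem.Int.mod (uniq.length : Int) x ≠ 0 then step0 + 1 else step0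
    ((PySem.List.pyRange 0 (uniq.length : Int) step).foldl (fun h i =>
        let chunk := PySem.List.slice uniq (some i) (some (i + step))
        let label := pvLabel chunk
        -- counts[e] never raises: every chunk element is a key of counts, so getD's 0 is unreachable
        h.insert label (h.getD label 0 + (chunk.map (fun e => counts.getD e 0)).sum))
      PySem.Dict.empty).items

-- ===== PRECONDITION & SPEC =====
-- Pre_ excludes x = 0 (A raises ZeroDivisionError) and x < 0 with a nonempty dataset
-- (step ≤ 0 makes A's while loop run forever); A returns on everything Pre_ admits.
def Pre_automatic_histogram (dataset : List Int) (x : Int) : Prop :=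
  0 < x ∨ (dataset = [] ∧ x ≠ 0)
instance (dataset : List Int) (x : Int) : Decidable (Pre_automatic_histogram dataset x) := by
  unfold Pre_automatic_histogram; infer_instance

def pvWitness_automatic_histogram : List Int × Int := ([1, 2, 2, 5, -3], 2)

def Spec_automatic_histogram (dataset : List Int) (x : Int) (out : List (String × Int)) : Prop :=
  out = automatic_histogram_alt dataset x
instance (dataset : List Int) (x : Int) (out : List (String × Int)) :
    Decidable (Spec_automatic_histogram dataset x out) := by
  unfold Spec_automatic_histogram; infer_instance

-- ===== CLAIM (what is proved, stated in full; the proofs are below) =====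
def Claim_equal_automatic_histogram : Prop := ∀ (dataset : List Int) (x : Int),
  Dom_automatic_histogram dataset x → Pre_automatic_histogram dataset x →
    Spec_automatic_histogram dataset x (automatic_histogram dataset x)

-- ===== LEMMAS AND PROOFS =====

-- proof-side view of the bucketing: consecutive chunks of size s+1
def pvChunks (s : Nat) : List Int → List (List Int)
  | [] => []
  | a :: l => ((a :: l).take (s + 1)) :: pvChunks s (l.drop s)
  termination_by l => l.length
  decreasing_by simp [List.length_drop]

lemma pvChunks_flatten (s : Nat) : (l : List Int) → (pvChunks s l).flatten = l
  | [] => by simp [pvChunks]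
  | a :: l => by
    rw [pvChunks, List.flatten_cons, List.take_succ_cons, pvChunks_flatten s (l.drop s)]
    simp [List.take_append_drop]
  termination_by l => l.length
  decreasing_by simp [List.length_drop]

lemma pvChunks_ne_nil (s : Nat) : (l : List Int) → ∀ ch ∈ pvChunks s l, ch ≠ []
  | [] => by simp [pvChunks]
  | a :: l => by
    intro ch hch
    rw [pvChunks] at hch
    rcases List.mem_cons.mp hch with h | h
    · simp [h, List.take_succ_cons]
    · exact pvChunks_ne_nil s (l.drop s) ch h
  termination_by l => l.length
  decreasing_by simp [List.length_drop]

lemma pvChunks_nodup (s : Nat) : (l : List Int) → l.Nodup → (pvChunks s l).Nodup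
  | [] => by simp [pvChunks]
  | a :: l => by
    intro h
    rw [pvChunks]
    rcases (List.nodup_cons.mp h) with ⟨hna, hnl⟩
    refine List.nodup_cons.mpr
      ⟨?_, pvChunks_nodup s (l.drop s) (hnl.sublist (List.drop_sublist s l))⟩
    intro hmem
    have ha : a ∈ (a :: l).take (s + 1) := by simp [List.take_succ_cons]
    have : a ∈ (pvChunks s (l.drop s)).flatten := List.mem_flatten.mpr ⟨_, hmem, ha⟩
    rw [pvChunks_flatten] at this
    exact hna ((List.drop_sublist s l).subset this)
  termination_by l => l.length
  decreasing_by simp [List.length_drop]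

-- A's create_value_count is Counter
lemma pv_cvc_eq (ds : List Int) : create_value_count ds = PySem.Dict.counter ds := by
  unfold create_value_count
  have hfg : (fun (d : PySem.Dict Int Int) a =>
      if d.contains a then d.insert a (d.getD a 0 + 1) else d.insert a 1)
      = fun (d : PySem.Dict Int Int) a => d.insert a (d.getD a 0 + 1) := by
    funext d a
    by_cases hc : d.contains a
    · simp [hc]
    · rw [if_neg hc, PySem.Dict.getD_of_not_contains _ _ (by simpa using hc)]
      norm_num
  rw [hfg, PySem.Dict.foldl_insert_getD_add_one_eq_counter]

-- exhausted loop
lemma pvBucketsLoop_done (us : List Int) (st : Int) (fuel : Nat) (i : Int)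
    (b : PySem.Dict (List Int) Int) (h : (us.length : Int) ≤ i) :
    pvBucketsLoop us st fuel i b = b := by
  cases fuel with
  | zero => rfl
  | succ fuel => simp [pvBucketsLoop, not_lt.mpr h]

-- the while loop over a suffix builds exactly the chunk dict
lemma pvBucketsLoop_eq (us : List Int) (s : Nat) :
    ∀ (fuel : Nat) (rest pre : List Int) (b : PySem.Dict (List Int) Int),
      us = pre ++ rest → rest.length ≤ fuel →
      pvBucketsLoop us ((s : Int) + 1) fuel (pre.length : Int) b
        = (pvChunks s rest).foldl (fun d ch => d.insert ch 0) b := by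
  intro fuel
  induction fuel with
  | zero =>
    intro rest pre b hus hlen
    have : rest = [] := List.eq_nil_of_length_eq_zero (by omega)
    subst this
    simp [pvChunks, pvBucketsLoop]
  | succ fuel ih =>
    intro rest pre b hus hlen
    rcases rest with _ | ⟨r, rs⟩
    · rw [pvBucketsLoop_done _ _ _ _ _ (by simp [hus])]
      simp [pvChunks]
    · have hlt : (pre.length : Int) < (us.length : Int) := by
        subst hus; push_cast [List.length_append, List.length_cons]; omega
      have hsl : PySem.List.slice us (some (pre.length : Int))
          (some ((pre.length : Int) + ((s : Int) + 1))) = (r :: rs).take (s + 1) := by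
        rw [show ((pre.length : Int) + ((s : Int) + 1)) = ((pre.length : Int) + ((s + 1 : Nat) : Int))
            by push_cast; ring,
          PySem.List.slice_natCast_add, hus, List.drop_left]
      rw [show pvBucketsLoop us ((s : Int) + 1) (fuel + 1) (pre.length : Int) b
            = pvBucketsLoop us ((s : Int) + 1) fuel ((pre.length : Int) + ((s : Int) + 1))
                (b.insert (PySem.List.slice us (some (pre.length : Int))
                  (some ((pre.length : Int) + ((s : Int) + 1)))) 0)
          from by simp [pvBucketsLoop, hlt], hsl]
      rw [show pvChunks s (r :: rs) = ((r :: rs).take (s + 1)) :: pvChunks s (rs.drop s)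
          from by rw [pvChunks]]
      by_cases hbig : (r :: rs).length ≤ s + 1
      · have htake : (r :: rs).take (s + 1) = r :: rs := List.take_of_length_le hbig
        have hdrop : rs.drop s = [] := List.drop_eq_nil_of_le (by simp at hbig ⊢; omega)
        rw [pvBucketsLoop_done _ _ _ _ _ (by subst hus; simp [List.length_append] at hbig ⊢; omega)]
        simp [htake, hdrop, pvChunks]
      · have hlen' : ((pre ++ (r :: rs).take (s + 1)).length : Int)
            = (pre.length : Int) + ((s : Int) + 1) := by
          simp [List.length_append, List.length_take]
          simp at hbig
          omega
        have hus' : us = (pre ++ (r :: rs).take (s + 1)) ++ (rs.drop s) := by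
          rw [hus, List.append_assoc]
          congr 1
          rw [show rs.drop s = (r :: rs).drop (s + 1) from (List.drop_succ_cons).symm,
            List.take_append_drop]
        have hfuel : (rs.drop s).length ≤ fuel := by
          simp [List.length_drop]
          simp at hlen
          omega
        rw [← hlen', ih (rs.drop s) (pre ++ (r :: rs).take (s + 1)) _ hus' hfuel]
        simp

lemma pv_pyRange_pos_cons (a b st : Int) (hst : 0 < st) (hab : a < b) :
    PySem.List.pyRange a b st = a :: PySem.List.pyRange (a + st) b st := by
  rw [PySem.List.pyRange_of_pos _ _ hst, PySem.List.pyRange_of_pos _ _ hst, if_pos hab]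
  have hq0 : 0 ≤ (b - a - 1) / st := Int.ediv_nonneg (by omega) (by omega)
  have h1 : ((b - a + st - 1) / st).toNat = ((b - a - 1) / st).toNat + 1 := by
    have : (b - a + st - 1) / st = (b - a - 1) / st + 1 := by
      rw [show b - a + st - 1 = (b - a - 1) + 1 * st by ring,
        Int.add_mul_ediv_right _ _ (by omega)]
    omega
  have h2 : (if a + st < b then ((b - (a + st) + st - 1) / st).toNat else 0)
      = ((b - a - 1) / st).toNat := by
    split_ifs with h
    · congr 2
      ring
    · rw [Int.ediv_eq_zero_of_lt (by omega) (by omega)]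
      rfl
  rw [h1, h2, List.range_succ_eq_map, List.map_cons, List.map_map]
  simp only [Nat.cast_zero, mul_zero, add_zero]
  congr 1
  apply List.map_congr_left
  intro k _
  simp only [Function.comp_apply, Nat.succ_eq_add_one]
  push_cast
  ring

-- B's range-of-slices fold is the chunk fold
lemma pvRange_fold_eq (uniq : List Int) (s : Nat)
    (F : PySem.Dict String Int → List Int → PySem.Dict String Int) :
    ∀ (N : Nat) (rest pre : List Int) (h : PySem.Dict String Int),
      rest.length ≤ N → uniq = pre ++ rest →
      (PySem.List.pyRange (pre.length : Int) (uniq.length : Int) ((s : Int) + 1)).foldl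
          (fun h i => F h (PySem.List.slice uniq (some i) (some (i + ((s : Int) + 1))))) h
        = (pvChunks s rest).foldl F h := by
  intro N
  induction N with
  | zero =>
    intro rest pre h hlen hus
    have : rest = [] := List.eq_nil_of_length_eq_zero (by omega)
    subst this
    rw [PySem.List.pyRange_of_pos _ _ (by omega)]
    simp [pvChunks, hus]
  | succ N ih =>
    intro rest pre h hlen hus
    rcases rest with _ | ⟨r, rs⟩
    · rw [PySem.List.pyRange_of_pos _ _ (by omega)]
      simp [pvChunks, hus]
    · have hlt : (pre.length : Int) < (uniq.length : Int) := by
        subst hus; push_cast [List.length_append, List.length_cons]; omega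
      have hsl : PySem.List.slice uniq (some (pre.length : Int))
          (some ((pre.length : Int) + ((s : Int) + 1))) = (r :: rs).take (s + 1) := by
        rw [show ((pre.length : Int) + ((s : Int) + 1)) = ((pre.length : Int) + ((s + 1 : Nat) : Int))
            by push_cast; ring,
          PySem.List.slice_natCast_add, hus, List.drop_left]
      rw [pv_pyRange_pos_cons _ _ _ (by omega) hlt,
        show pvChunks s (r :: rs) = ((r :: rs).take (s + 1)) :: pvChunks s (rs.drop s)
          from by rw [pvChunks]]
      simp only [List.foldl_cons]
      rw [hsl]
      by_cases hbig : (r :: rs).length ≤ s + 1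
      · have hdrop : rs.drop s = [] := List.drop_eq_nil_of_le (by simp at hbig ⊢; omega)
        rw [hdrop, PySem.List.pyRange_of_pos _ _ (by omega),
          if_neg (by subst hus; simp [List.length_append] at hbig ⊢; omega)]
        simp [pvChunks]
      · have hlen' : ((pre ++ (r :: rs).take (s + 1)).length : Int)
            = (pre.length : Int) + ((s : Int) + 1) := by
          simp [List.length_append, List.length_take]
          simp at hbig
          omega
        have hus' : uniq = (pre ++ (r :: rs).take (s + 1)) ++ (rs.drop s) := by
          rw [hus, List.append_assoc]
          congr 1
          rw [show rs.drop s = (r :: rs).drop (s + 1) from (List.drop_succ_cons).symm,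
            List.take_append_drop]
        have hfuel : (rs.drop s).length ≤ N := by
          simp [List.length_drop]
          simp at hlen
          omega
        rw [← hlen', ih (rs.drop s) _ _ hfuel hus']

-- a run of 'histogram[L] = histogram.get(L,0) + c' updates collapses to one insert of the sum
lemma pv_fold_run' (L : String) (c : Int → Int) :
    ∀ (ch : List Int) (h : PySem.Dict String Int) (v : Int),
      ch.foldl (fun h k => h.insert L (h.getD L 0 + c k)) (h.insert L v)
        = h.insert L (v + (ch.map c).sum) := by
  intro ch
  induction ch with
  | nil => simp
  | cons k ch ih =>
    intro h v
    simp only [List.foldl_cons, PySem.Dict.getD_insert_self, PySem.Dict.insert_insert_self]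
    rw [ih h (v + c k)]
    simp [add_assoc]

lemma pv_fold_run (L : String) (c : Int → Int) (ch : List Int) (h : PySem.Dict String Int)
    (hne : ch ≠ []) :
    ch.foldl (fun h k => h.insert L (h.getD L 0 + c k)) h
      = h.insert L (h.getD L 0 + (ch.map c).sum) := by
  rcases ch with _ | ⟨k, ch⟩
  · exact absurd rfl hne
  · simp only [List.foldl_cons]
    rw [pv_fold_run' L c ch h (h.getD L 0 + c k)]
    simp [add_assoc]

lemma pvScanBuckets_skip (e cnt : Int) (seen rest : List (List Int))
    (h : PySem.Dict String Int) (he : e ∉ seen.flatten) :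
    pvScanBuckets e cnt (seen ++ rest) h = pvScanBuckets e cnt rest h := by
  induction seen with
  | nil => rfl
  | cons bk seen ih =>
    simp only [List.flatten_cons, List.mem_append, not_or] at he
    rw [List.cons_append, pvScanBuckets, if_neg (by simpa using he.1)]
    exact ih he.2

lemma pvScanBuckets_hit (e cnt : Int) (ch : List Int) (rest : List (List Int))
    (h : PySem.Dict String Int) (he : e ∈ ch) :
    pvScanBuckets e cnt (ch :: rest) h
      = h.insert (pvBucketStr ch) (h.getD (pvBucketStr ch) 0 + cnt) := by
  rw [pvScanBuckets, if_pos (List.elem_eq_true_of_mem he)]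
  by_cases hc : h.contains (pvBucketStr ch)
  · simp [hc]
  · rw [PySem.Dict.getD_of_not_contains _ _ (by simpa using hc)]
    simp [hc]

-- A's per-element histogram loop, grouped by chunks
lemma pv_hist_eq (c : Int → Int) :
    ∀ (rest seen : List (List Int)) (h : PySem.Dict String Int),
      ((seen ++ rest).flatten).Nodup → (∀ ch ∈ rest, ch ≠ []) →
      (rest.flatMap (fun ch => ch.map (fun k => (k, c k)))).foldl
          (fun h p => pvScanBuckets p.1 p.2 (seen ++ rest) h) h
        = rest.foldl
            (fun h ch => h.insert (pvBucketStr ch) (h.getD (pvBucketStr ch) 0 + (ch.map c).sum)) h := by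
  intro rest
  induction rest with
  | nil => simp
  | cons ch rest ih =>
    intro seen h hnd hnn
    have hchne : ch ≠ [] := hnn ch (by simp)
    have hdisj : ∀ k ∈ ch, k ∉ seen.flatten := by
      intro k hk hk'
      rw [List.flatten_append] at hnd
      rcases List.nodup_append.mp hnd with ⟨_, _, hdis⟩
      exact hdis k hk' k (by simp [List.flatten_cons, hk]) rfl
    rw [List.flatMap_cons, List.foldl_append, List.foldl_cons, List.foldl_map]
    have h2 : ch.foldl
        (fun x k => pvScanBuckets k (c k) (seen ++ ch :: rest) x) h
        = h.insert (pvBucketStr ch) (h.getD (pvBucketStr ch) 0 + (ch.map c).sum) := by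
      refine (List.foldl_ext _
          (fun h' k => h'.insert (pvBucketStr ch) (h'.getD (pvBucketStr ch) 0 + c k)) h ?_).trans
        (pv_fold_run (pvBucketStr ch) c ch h hchne)
      intro h' k hk
      rw [pvScanBuckets_skip _ _ _ _ _ (hdisj k hk), pvScanBuckets_hit _ _ _ _ _ hk]
    have hlist : seen ++ ch :: rest = (seen ++ [ch]) ++ rest := by simp
    rw [show (ch.foldl (fun x k =>
          pvScanBuckets ((fun k => (k, c k)) k).1 ((fun k => (k, c k)) k).2
            (seen ++ ch :: rest) x) h) = h.insert (pvBucketStr ch)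
          (h.getD (pvBucketStr ch) 0 + (ch.map c).sum) from h2, hlist]
    exact ih (seen ++ [ch]) _ (by rw [← hlist]; exact hnd) (fun c hc => hnn c (by simp [hc]))

-- the computed step is positive on a nonempty unique list when 0 < x
lemma pv_step_pos (n x : Int) (hn : 0 < n) (hx : 0 < x) :
    0 < (if PySem.Int.mod n x ≠ 0 then PySem.Int.floordiv n x + 1 else PySem.Int.floordiv n x) := by
  by_cases hm : PySem.Int.mod n x = 0
  · rw [if_neg (by simp [hm])]
    have hd : x ∣ n := (PySem.Int.mod_eq_zero_iff_dvd n x).mp hm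
    have hxle : x ≤ n := Int.le_of_dvd hn hd
    have := (PySem.Int.le_floordiv_iff_mul_le (a := n) (b := x) (q := 1) hx).mpr (by omega)
    omega
  · rw [if_pos hm]
    have := (PySem.Int.le_floordiv_iff_mul_le (a := n) (b := x) (q := 0) hx).mpr (by omega)
    omega

lemma pv_set_update_eq_append {α : Type} [BEq α] [LawfulBEq α] :
    ∀ (l acc : List α), (∀ a ∈ l, a ∉ acc) → l.Nodup → PySem.Set.update acc l = acc ++ l := by
  intro l
  induction l with
  | nil => intro acc _ _; simp [PySem.Set.update]
  | cons a l ih =>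
    intro acc hdisj hnd
    have hadd : PySem.Set.add acc a = acc ++ [a] := by
      rw [PySem.Set.add, if_neg]
      simp [PySem.Set.contains]
      exact hdisj a (by simp)
    have hstep : PySem.Set.update acc (a :: l) = PySem.Set.update (acc ++ [a]) l := by
      simp only [PySem.Set.update, List.foldl_cons, hadd]
    rw [hstep, ih (acc ++ [a]) ?_ (List.nodup_cons.mp hnd).2]
    · simp
    · intro b hb
      simp only [List.mem_append, List.mem_singleton, not_or]
      exact ⟨fun h => hdisj b (by simp [hb]) h,
        fun h => (List.nodup_cons.mp hnd).1 (h ▸ hb)⟩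

lemma pv_main (dataset : List Int) (x : Int) (hne : dataset ≠ []) (hx : 0 < x) :
    automatic_histogram dataset x = automatic_histogram_alt dataset x := by
  have hUne : PySem.Set.ofList dataset ≠ [] := by
    rcases dataset with _ | ⟨a, ds⟩
    · exact absurd rfl hne
    · intro h0
      have ha : a ∈ PySem.Set.ofList (a :: ds) := (PySem.Set.mem_ofList _ _).mpr (by simp)
      rw [h0] at ha
      simp at ha
  have hUnd := PySem.Set.nodup_ofList dataset
  set U := PySem.Set.ofList dataset with hU
  have hn : 0 < (U.length : Int) := by
    rcases hU' : U with _ | ⟨a, t⟩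
    · exact absurd hU' hUne
    · simp
  set st := (if PySem.Int.mod (U.length : Int) x ≠ 0
      then PySem.Int.floordiv (U.length : Int) x + 1
      else PySem.Int.floordiv (U.length : Int) x) with hstdef
  have hstpos : 0 < st := pv_step_pos _ _ hn hx
  obtain ⟨s, hs⟩ : ∃ s : Nat, st = (s : Int) + 1 := ⟨(st - 1).toNat, by omega⟩
  have hflat : (pvChunks s U).flatten = U := pvChunks_flatten s U
  have hcsnodup : (pvChunks s U).Nodup := pvChunks_nodup s U hUnd
  have hcsne : ∀ ch ∈ pvChunks s U, ch ≠ [] := pvChunks_ne_nil s U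
  -- A side: buckets dict = fold of chunk inserts, its keys = the chunks
  have hbuckets :
      pvBucketsLoop U st U.length 0 PySem.Dict.empty
        = (pvChunks s U).foldl (fun d ch => d.insert ch 0) PySem.Dict.empty := by
    have := pvBucketsLoop_eq U s U.length U [] PySem.Dict.empty (by simp) (le_refl _)
    simp only [List.length_nil, Nat.cast_zero] at this
    rw [hs]
    exact this
  have hbkeys :
      (pvBucketsLoop U st U.length 0 PySem.Dict.empty).keys = pvChunks s U := by
    rw [hbuckets]
    have h1 : ((pvChunks s U).foldl (fun d ch => d.insert ch (0 : Int))
          (PySem.Dict.empty : PySem.Dict (List Int) Int)).keys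
        = PySem.Set.update (PySem.Dict.empty : PySem.Dict (List Int) Int).keys (pvChunks s U) :=
      PySem.Dict.keys_foldl_insert (pvChunks s U) (fun _ _ => (0 : Int)) _
    rw [h1, PySem.Dict.keys_empty,
      pv_set_update_eq_append (pvChunks s U) [] (by simp) hcsnodup]
    simp
  have hA : automatic_histogram dataset x
      = ((pvChunks s U).foldl
          (fun h ch => h.insert (pvBucketStr ch)
            (h.getD (pvBucketStr ch) 0 + (ch.map (fun k => (dataset.count k : Int))).sum))
          PySem.Dict.empty).items := by
    simp only [automatic_histogram]
    rw [pv_cvc_eq, PySem.Dict.keys_counter, ← hU, ← hstdef, hbkeys, PySem.Dict.items_counter, ← hU]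
    have hhist := pv_hist_eq (fun k => (dataset.count k : Int)) (pvChunks s U) []
      PySem.Dict.empty (by simpa [hflat] using hUnd) hcsne
    simp only [List.nil_append] at hhist
    have hlist : U.map (fun k => (k, (dataset.count k : Int)))
        = (pvChunks s U).flatMap (fun ch => ch.map (fun k => (k, (dataset.count k : Int)))) := by
      conv_lhs => rw [← hflat]
      rw [List.map_flatten, List.flatMap_def]
    rw [hlist]
    exact congrArg PySem.Dict.items hhist
  -- B side
  have hB : automatic_histogram_alt dataset x
      = ((pvChunks s U).foldl
          (fun h ch => h.insert (pvLabel ch)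
            (h.getD (pvLabel ch) 0
              + (ch.map (fun e => (PySem.Dict.counter dataset).getD e 0)).sum))
          PySem.Dict.empty).items := by
    simp only [automatic_histogram_alt]
    rw [PySem.Dict.foldl_insert_getD_add_one_eq_counter, PySem.Dict.keys_counter, ← hU,
      if_neg (by simpa [List.isEmpty_iff] using hUne), ← hstdef]
    have hrange := pvRange_fold_eq U s
      (fun h chunk => h.insert (pvLabel chunk)
        (h.getD (pvLabel chunk) 0
          + (chunk.map (fun e => (PySem.Dict.counter dataset).getD e 0)).sum))
      U.length U [] PySem.Dict.empty (le_refl _) (by simp)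
    simp only [List.length_nil, Nat.cast_zero] at hrange
    rw [hs]
    exact congrArg PySem.Dict.items hrange
  rw [hA, hB]
  congr 1
  apply List.foldl_ext
  intro h ch _
  have hmap : ch.map (fun e => (PySem.Dict.counter dataset).getD e 0)
      = ch.map (fun k => (dataset.count k : Int)) := by
    apply List.map_congr_left
    intro e _
    exact PySem.Dict.getD_counter dataset e
  rw [hmap]
  rfl

-- ===== VERDICT (by name: the statement is the Claim_ definition above) =====
theorem automatic_histogram_spec : Claim_equal_automatic_histogram := by
  intro dataset x _hdom hpre
  unfold Spec_automatic_histogram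
  rcases dataset with _ | ⟨a, ds⟩
  · rfl
  · rcases hpre with hx | ⟨hnil, _⟩
    · exact pv_main _ _ (by simp) hx
    · exact absurd hnil (by simp)
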